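-- pv_equiv track=rewrite | github.com/shbrainard/hazelnut-phenotyping | lib/hazelnuts.py | sort_nuts
-- ===== SOURCE A (Python) =====
-- def sort_nuts(cropped_nuts: list, rows: int, columns: int) -> list:
--     """
--     sort cropped nuts from top left to bottom right
--     """
--     sorted_nuts = []
--     sorted_by_top = sorted(cropped_nuts, key=lambda x: x["top"][1])
--
--     for row in range(rows):
--         that_row = sorted_by_top[row * columns : (row + 1) * columns]
--         sorted_row = sorted(that_row, key=lambda x: x["left"][0])
--         sorted_nuts += sorted_row
--     return sorted_nuts
-- ===== SOURCE B (Python) =====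
-- def sort_nuts(cropped_nuts: list, rows: int, columns: int) -> list:
--     """
--     sort cropped nuts from top left to bottom right:
--     one stable sort keyed on (row group, left edge) instead of a per-row loop of sorts
--     """
--     if rows <= 0 or columns <= 0:
--         return []
--     by_top = sorted(cropped_nuts, key=lambda x: x["top"][1])
--     kept = by_top[: rows * columns]
--     order = sorted(enumerate(kept), key=lambda p: (p[0] // columns, p[1]["left"][0]))
--     return [nut for _, nut in order]
-- ===== Notes on version B (the rewrite author's own statement) =====
-- stated objective: alternative
-- what changed: Replaces A's per-row loop that slices the top-sorted list and sorts each slice with a single truncation to the first rows*columns nuts followed by ONE stable sort keyed on (position // columns, left edge), relying on sort stability for the row grouping.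
-- intended difference: On grids requested with columns < 0 and rows > 0 over more nuts than |columns|, A's negative slice bounds wrap around and return some nuts (e.g. the first len+columns of the top-sorted list for row 0), while B returns the empty list, the intended answer for a non-positive column count. — e.g. on sort_nuts([[("top", [0, 0]), ("left", [5])], [("top", [0, 1]), ("left", [3])]], 1, -1): A returns [[("top", [0, 0]), ("left", [5])]], B returns []
import Mathlib
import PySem

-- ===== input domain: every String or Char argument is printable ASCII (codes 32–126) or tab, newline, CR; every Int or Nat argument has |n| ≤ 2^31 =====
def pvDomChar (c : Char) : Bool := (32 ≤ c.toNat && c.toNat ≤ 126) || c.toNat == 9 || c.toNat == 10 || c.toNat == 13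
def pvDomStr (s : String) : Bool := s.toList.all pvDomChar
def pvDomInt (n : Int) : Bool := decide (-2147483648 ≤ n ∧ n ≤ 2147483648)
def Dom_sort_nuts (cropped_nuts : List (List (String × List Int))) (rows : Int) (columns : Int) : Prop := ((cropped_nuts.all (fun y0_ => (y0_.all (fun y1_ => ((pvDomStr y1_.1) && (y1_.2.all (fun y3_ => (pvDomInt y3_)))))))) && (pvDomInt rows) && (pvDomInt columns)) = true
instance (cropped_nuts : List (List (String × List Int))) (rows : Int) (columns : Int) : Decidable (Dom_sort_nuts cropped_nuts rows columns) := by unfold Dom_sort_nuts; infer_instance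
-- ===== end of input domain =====

-- B replaces A's per-row loop of sorts by one truncation plus one stable sort keyed on
-- (row group, left edge); equal outside D_sort_nuts (negative column counts), where A's
-- negative-slice wraparound returns nuts and B returns the intended empty grid.


-- shared key helpers: x["top"][1] and x["left"][0]; the .getD defaults are dead under Pre_
def keyTop (x : List (String × List Int)) : Int :=
  PySem.List.pyGetD ((PySem.Dict.get? (PySem.Dict.mk x) "top").getD []) 1 0
def keyLeft (x : List (String × List Int)) : Int :=
  PySem.List.pyGetD ((PySem.Dict.get? (PySem.Dict.mk x) "left").getD []) 0 0

-- ===== PORT A =====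
def sort_nuts (cropped_nuts : List (List (String × List Int))) (rows : Int) (columns : Int) : List (List (String × List Int)) :=
  let sorted_by_top := PySem.List.sorted cropped_nuts keyTop false
  (PySem.List.pyRange 0 rows 1).foldl (fun sorted_nuts row =>
    let that_row := PySem.List.slice sorted_by_top (some (row * columns)) (some ((row + 1) * columns))
    let sorted_row := PySem.List.sorted that_row keyLeft false
    sorted_nuts ++ sorted_row) []

-- ===== PORT B =====
def sort_nuts_alt (cropped_nuts : List (List (String × List Int))) (rows : Int) (columns : Int) : List (List (String × List Int)) :=
  if rows ≤ 0 ∨ columns ≤ 0 then []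
  else
    let by_top := PySem.List.sorted cropped_nuts keyTop false
    let kept := PySem.List.slice by_top none (some (rows * columns))
    let order := PySem.List.sorted2 (PySem.List.enumerate kept 0)
      (fun p => PySem.Int.floordiv p.1 columns) (fun p => keyLeft p.2) false
    order.map (fun p => p.2)

-- ===== PRECONDITION & SPEC =====
-- Pre_ excludes the inputs on which Python A raises (a nut without a "top" entry of length ≥ 2
-- where sorting reads it, or without a "left" entry of length ≥ 1 where a row sort reads it);
-- asking "left" of EVERY nut when a row is taken slightly narrows A's domain, since A never
-- reads "left" of nuts beyond the first rows*columns grid slots of the top-sorted order.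
def Pre_sort_nuts (cropped_nuts : List (List (String × List Int))) (rows : Int) (columns : Int) : Prop :=
  (∀ x ∈ cropped_nuts, 2 ≤ ((PySem.Dict.get? (PySem.Dict.mk x) "top").getD []).length) ∧
  (0 < rows → columns ≠ 0 → ∀ x ∈ cropped_nuts, 1 ≤ ((PySem.Dict.get? (PySem.Dict.mk x) "left").getD []).length)
instance (cropped_nuts : List (List (String × List Int))) (rows : Int) (columns : Int) : Decidable (Pre_sort_nuts cropped_nuts rows columns) := by unfold Pre_sort_nuts; infer_instance
def pvWitness_sort_nuts : (List (List (String × List Int))) × Int × Int :=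
  ([[("top", [0, 5]), ("left", [3])], [("top", [0, 2]), ("left", [7])]], 2, 1)

-- On grids requested with columns < 0 (and at least one row) over more nuts than |columns|,
-- A's negative slice bounds wrap around and return some nuts, while B returns the intended
-- empty list for a non-positive column count.
def D_sort_nuts (cropped_nuts : List (List (String × List Int))) (rows : Int) (columns : Int) : Prop :=
  0 < rows ∧ columns < 0 ∧ -columns < (cropped_nuts.length : Int)
instance (cropped_nuts : List (List (String × List Int))) (rows : Int) (columns : Int) : Decidable (D_sort_nuts cropped_nuts rows columns) := by unfold D_sort_nuts; infer_instance

def Spec_sort_nuts (cropped_nuts : List (List (String × List Int))) (rows : Int) (columns : Int) (out : List (List (String × List Int))) : Prop := ¬ D_sort_nuts cropped_nuts rows columns → out = sort_nuts_alt cropped_nuts rows columns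
instance (cropped_nuts : List (List (String × List Int))) (rows : Int) (columns : Int) (out : List (List (String × List Int))) : Decidable (Spec_sort_nuts cropped_nuts rows columns out) := by unfold Spec_sort_nuts; infer_instance

def pvDiffWitness_sort_nuts : (List (List (String × List Int))) × Int × Int :=
  ([[("top", [0, 0]), ("left", [5])], [("top", [0, 1]), ("left", [3])]], 1, -1)
def pvDiffWitnessOut_sort_nuts : (List (List (String × List Int))) × (List (List (String × List Int))) :=
  ([[("top", [0, 0]), ("left", [5])]], [])

-- ===== CLAIM (what is proved, stated in full; the proofs are below) =====
def Claim_unchanged_sort_nuts : Prop := ∀ (cropped_nuts : List (List (String × List Int))) (rows : Int) (columns : Int), Dom_sort_nuts cropped_nuts rows columns → Pre_sort_nuts cropped_nuts rows columns → Spec_sort_nuts cropped_nuts rows columns (sort_nuts cropped_nuts rows columns)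
def Claim_changed_sort_nuts : Prop := Dom_sort_nuts (pvDiffWitness_sort_nuts.1) (pvDiffWitness_sort_nuts.2.1) (pvDiffWitness_sort_nuts.2.2) ∧ Pre_sort_nuts (pvDiffWitness_sort_nuts.1) (pvDiffWitness_sort_nuts.2.1) (pvDiffWitness_sort_nuts.2.2) ∧ D_sort_nuts (pvDiffWitness_sort_nuts.1) (pvDiffWitness_sort_nuts.2.1) (pvDiffWitness_sort_nuts.2.2) ∧ sort_nuts (pvDiffWitness_sort_nuts.1) (pvDiffWitness_sort_nuts.2.1) (pvDiffWitness_sort_nuts.2.2) = pvDiffWitnessOut_sort_nuts.1 ∧ sort_nuts_alt (pvDiffWitness_sort_nuts.1) (pvDiffWitness_sort_nuts.2.1) (pvDiffWitness_sort_nuts.2.2) = pvDiffWitnessOut_sort_nuts.2 ∧ pvDiffWitnessOut_sort_nuts.1 ≠ pvDiffWitnessOut_sort_nuts.2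
def Claim_exact_sort_nuts : Prop := ∀ (cropped_nuts : List (List (String × List Int))) (rows : Int) (columns : Int), Dom_sort_nuts cropped_nuts rows columns → Pre_sort_nuts cropped_nuts rows columns → D_sort_nuts cropped_nuts rows columns → sort_nuts cropped_nuts rows columns ≠ sort_nuts_alt cropped_nuts rows columns

-- ===== LEMMAS AND PROOFS =====

-- the r-th row chunk of the top-sorted list
def chunkF {α : Type} (S : List α) (C r : Nat) : List α := (S.drop (r * C)).take C

-- the comparison sorted2 uses in B's port, named
def b2 (C : Int) (a b : Int × List (String × List Int)) : Bool :=
  decide (PySem.Int.floordiv a.1 C < PySem.Int.floordiv b.1 C) ||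
    (!decide (PySem.Int.floordiv b.1 C < PySem.Int.floordiv a.1 C) && decide (keyLeft a.2 < keyLeft b.2))

theorem sorted2_eq_foldl_b2 (xs : List (Int × List (String × List Int))) (C : Int) :
    PySem.List.sorted2 xs (fun p => PySem.Int.floordiv p.1 C) (fun p => keyLeft p.2) false
      = xs.foldl (fun acc x => PySem.List.insertBy (b2 C) x acc) [] := rfl

theorem clampIdx_eq_zero {n : Nat} {i : Int} (h : (n : Int) + i ≤ 0) :
    PySem.List.clampIdx n i = 0 := by
  unfold PySem.List.clampIdx
  split_ifs <;> omega

theorem clampIdx_zero (n : Nat) : PySem.List.clampIdx n 0 = 0 := by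
  unfold PySem.List.clampIdx
  split_ifs <;> omega

theorem insertBy_append_of_not_before {α : Type} (b : α → α → Bool) (x : α) (A acc : List α)
    (h : ∀ z ∈ A, b x z = false) :
    PySem.List.insertBy b x (A ++ acc) = A ++ PySem.List.insertBy b x acc := by
  induction A with
  | nil => rfl
  | cons z A ih =>
    have hz : b x z = false := h z (by simp)
    simp [PySem.List.insertBy, hz, ih (fun w hw => h w (by simp [hw]))]

theorem foldl_insertBy_append {α : Type} (b : α → α → Bool) (A : List α) (l : List α)
    (h : ∀ y ∈ l, ∀ z ∈ A, b y z = false) :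
    ∀ acc : List α,
      l.foldl (fun acc x => PySem.List.insertBy b x acc) (A ++ acc)
        = A ++ l.foldl (fun acc x => PySem.List.insertBy b x acc) acc := by
  induction l with
  | nil => intro acc; rfl
  | cons y l ih =>
    intro acc
    have hy : ∀ z ∈ A, b y z = false := fun z hz => h y (by simp) z hz
    simp only [List.foldl_cons, insertBy_append_of_not_before b y A acc hy]
    exact ih (fun y' hy' z hz => h y' (by simp [hy']) z hz) _

theorem insertBy_map {α β : Type} (f : α → β) (b' : α → α → Bool) (b : β → β → Bool)
    (x : α) (acc : List α) (h : ∀ q ∈ acc, b' x q = b (f x) (f q)) :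
    (PySem.List.insertBy b' x acc).map f = PySem.List.insertBy b (f x) (acc.map f) := by
  induction acc with
  | nil => rfl
  | cons q acc ih =>
    have hq := h q (by simp)
    by_cases hb : b' x q = true
    · simp [PySem.List.insertBy, hb, hq ▸ hb]
    · have hb' : b' x q = false := by simpa using hb
      have hbf : b (f x) (f q) = false := hq ▸ hb'
      simp [PySem.List.insertBy, hb', hbf, ih (fun w hw => h w (by simp [hw]))]

theorem foldl_insertBy_map {α β : Type} (f : α → β) (b' : α → α → Bool) (b : β → β → Bool) :
    ∀ (l acc : List α), (∀ x ∈ l, ∀ q, (q ∈ l ∨ q ∈ acc) → b' x q = b (f x) (f q)) →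
      (l.foldl (fun a x => PySem.List.insertBy b' x a) acc).map f
        = (l.map f).foldl (fun a y => PySem.List.insertBy b y a) (acc.map f) := by
  intro l
  induction l with
  | nil => intro acc _; rfl
  | cons x l ih =>
    intro acc h
    simp only [List.foldl_cons, List.map_cons]
    rw [← insertBy_map f b' b x acc (fun q hq => h x (by simp) q (Or.inr hq))]
    exact ih _ (fun x' hx' q hq => by
      rcases hq with hq | hq
      · exact h x' (by simp [hx']) q (Or.inl (by simp [hq]))
      · rcases (PySem.List.mem_insertBy b' x q acc).mp hq with hq | hq
        · exact h x' (by simp [hx']) q (Or.inl (by simp [hq]))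
        · exact h x' (by simp [hx']) q (Or.inr hq))

-- every pair enumerated in the r-th chunk has row group r
theorem floordiv_of_mem_chunk {α : Type} {S : List α} {C r : Nat} (hC : 0 < C)
    {p : Int × α}
    (hp : p ∈ PySem.List.enumerate (chunkF S C r) ((min (r * C) S.length : Nat) : Int)) :
    PySem.Int.floordiv p.1 (C : Int) = (r : Int) := by
  obtain ⟨k, hk, rfl⟩ := (PySem.List.mem_enumerate_iff _ _ _).mp hp
  simp only [chunkF, List.length_take, List.length_drop] at hk
  have hkC : k < C := lt_of_lt_of_le hk (min_le_left _ _)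
  have hrC : r * C < S.length := by omega
  have hmin : min (r * C) S.length = r * C := by omega
  rw [hmin]
  rw [PySem.Int.floordiv_eq_iff_of_pos (by exact_mod_cast hC)]
  constructor
  · push_cast
    have : (0 : Int) ≤ (k : Int) := by positivity
    linarith
  · push_cast
    have : (k : Int) < (C : Int) := by exact_mod_cast hkC
    linarith

-- dropping indices from the one-chunk sort gives the plain left sort
theorem map_snd_sorted2_const {xs : List (List (String × List Int))} {s : Int} {C : Int} {r : Int}
    (hg : ∀ p ∈ PySem.List.enumerate xs s, PySem.Int.floordiv p.1 C = r) :
    (PySem.List.sorted2 (PySem.List.enumerate xs s)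
        (fun p => PySem.Int.floordiv p.1 C) (fun p => keyLeft p.2) false).map (fun p => p.2)
      = PySem.List.sorted xs keyLeft false := by
  rw [sorted2_eq_foldl_b2, PySem.List.sorted_eq_foldl_insertBy]
  have h := foldl_insertBy_map (fun p : Int × List (String × List Int) => p.2) (b2 C)
      (fun a b => decide (keyLeft a < keyLeft b)) (PySem.List.enumerate xs s) []
      (by
        intro x hx q hq
        rcases hq with hq | hq
        · simp [b2, hg x hx, hg q hq]
        · simp at hq)
  simpa [PySem.List.map_snd_enumerate] using h

-- the total stable sort splits into the per-chunk sorts (row groups strictly increase)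
theorem sorted2_take_chunks (S : List (List (String × List Int))) {C : Nat} (hC : 0 < C) :
    ∀ R : Nat,
      PySem.List.sorted2 (PySem.List.enumerate (S.take (R * C)) 0)
          (fun p => PySem.Int.floordiv p.1 (C : Int)) (fun p => keyLeft p.2) false
        = ((List.range R).map (fun r =>
            PySem.List.sorted2 (PySem.List.enumerate (chunkF S C r) ((min (r * C) S.length : Nat) : Int))
              (fun p => PySem.Int.floordiv p.1 (C : Int)) (fun p => keyLeft p.2) false)).flatten := by
  intro R
  induction R with
  | zero => simp [PySem.List.sorted2]
  | succ R ih =>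
    have ht : S.take ((R + 1) * C) = S.take (R * C) ++ chunkF S C R := by
      rw [Nat.succ_mul, List.take_add]; rfl
    rw [ht, PySem.List.enumerate_append, sorted2_eq_foldl_b2, List.foldl_append,
        ← sorted2_eq_foldl_b2, ih]
    have hoff : (0 : Int) + ((S.take (R * C)).length : Int) = ((min (R * C) S.length : Nat) : Int) := by
      simp [List.length_take]
    rw [hoff]
    have hsplit := foldl_insertBy_append (b2 (C : Int))
        (((List.range R).map (fun r =>
          PySem.List.sorted2 (PySem.List.enumerate (chunkF S C r) ((min (r * C) S.length : Nat) : Int))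
            (fun p => PySem.Int.floordiv p.1 (C : Int)) (fun p => keyLeft p.2) false)).flatten)
        (PySem.List.enumerate (chunkF S C R) ((min (R * C) S.length : Nat) : Int))
        (by
          intro y hy z hz
          obtain ⟨lr, hlr, hzlr⟩ := List.mem_flatten.mp hz
          obtain ⟨r, hr, rfl⟩ := List.mem_map.mp hlr
          have hrR : r < R := List.mem_range.mp hr
          have hz' : z ∈ PySem.List.enumerate (chunkF S C r) ((min (r * C) S.length : Nat) : Int) :=
            (PySem.List.sorted2_perm _ _ _ _).mem_iff.mp hzlr
          have hgz := floordiv_of_mem_chunk hC hz'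
          have hgy := floordiv_of_mem_chunk hC hy
          simp only [b2, hgz, hgy]
          have h1 : ¬ ((R : Int) < (r : Int)) := by exact_mod_cast Nat.not_lt.mpr (le_of_lt hrR)
          have h2 : (r : Int) < (R : Int) := by exact_mod_cast hrR
          simp [h1, h2]) []
    rw [List.append_nil] at hsplit
    rw [hsplit, ← sorted2_eq_foldl_b2]
    simp [List.range_succ]


-- A's loop as a flatten of per-row sorted chunks (nonnegative literal grid sizes)
theorem sort_nuts_norm (nuts : List (List (String × List Int))) (R C : Nat) :
    sort_nuts nuts (R : Int) (C : Int)
      = ((List.range R).map (fun r =>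
          PySem.List.sorted (chunkF (PySem.List.sorted nuts keyTop false) C r) keyLeft false)).flatten := by
  unfold sort_nuts
  rw [PySem.List.pyRange_zero_natCast, List.foldl_map,
      PySem.List.foldl_append_eq_flatMap
        (g := fun k : Nat => PySem.List.sorted
          (PySem.List.slice (PySem.List.sorted nuts keyTop false)
            (some ((k : Int) * (C : Int))) (some (((k : Int) + 1) * (C : Int)))) keyLeft false),
      List.nil_append, List.flatMap_def]
  congr 1
  apply List.map_congr_left
  intro r _
  have h1 : ((r : Int) * (C : Int)) = ((r * C : Nat) : Int) := by push_cast; ring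
  have h2 : (((r : Int) + 1) * (C : Int)) = (((r + 1) * C : Nat) : Int) := by push_cast; ring
  rw [h1, h2, PySem.List.slice_natCast]
  have h3 : (r + 1) * C - r * C = C := by simp [Nat.succ_mul]
  rw [h3]
  rfl

-- B as the one stable sort over the enumerated truncation (positive grid sizes)
theorem sort_nuts_alt_norm (nuts : List (List (String × List Int))) (R C : Nat)
    (hR : 0 < R) (hC : 0 < C) :
    sort_nuts_alt nuts (R : Int) (C : Int)
      = (PySem.List.sorted2
          (PySem.List.enumerate ((PySem.List.sorted nuts keyTop false).take (R * C)) 0)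
          (fun p => PySem.Int.floordiv p.1 (C : Int)) (fun p => keyLeft p.2) false).map
          (fun p => p.2) := by
  unfold sort_nuts_alt
  rw [if_neg (by omega)]
  show (PySem.List.sorted2
      (PySem.List.enumerate (PySem.List.slice (PySem.List.sorted nuts keyTop false) none
        (some ((R : Int) * (C : Int)))) 0)
      (fun p => PySem.Int.floordiv p.1 (C : Int)) (fun p => keyLeft p.2) false).map
      (fun p => p.2) = _
  have h1 : ((R : Int) * (C : Int)) = ((R * C : Nat) : Int) := by push_cast; ring
  rw [h1, PySem.List.slice_to _ (Int.natCast_nonneg (R * C)), Int.toNat_natCast]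

-- the two programs agree on positive grid sizes
theorem sort_nuts_eq_pos (nuts : List (List (String × List Int))) (R C : Nat)
    (hR : 0 < R) (hC : 0 < C) :
    sort_nuts nuts (R : Int) (C : Int) = sort_nuts_alt nuts (R : Int) (C : Int) := by
  rw [sort_nuts_norm, sort_nuts_alt_norm nuts R C hR hC,
      sorted2_take_chunks (PySem.List.sorted nuts keyTop false) hC R,
      List.map_flatten, List.map_map]
  congr 1
  apply List.map_congr_left
  intro r _
  exact (map_snd_sorted2_const (fun p hp => floordiv_of_mem_chunk hC hp)).symm

-- A returns [] when it is asked for no rows, or no columns, or when every slice is empty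
theorem sort_nuts_eq_nil_of_nonpos_rows (nuts : List (List (String × List Int)))
    {rows : Int} (columns : Int) (h : rows ≤ 0) : sort_nuts nuts rows columns = [] := by
  unfold sort_nuts
  have : PySem.List.pyRange 0 rows 1 = [] := by
    apply List.eq_nil_iff_forall_not_mem.mpr
    intro x hx
    have := PySem.List.mem_pyRange_one.mp hx
    omega
  rw [this]
  rfl

theorem sort_nuts_eq_nil_of_empty_slices (nuts : List (List (String × List Int)))
    (rows : Int) {columns : Int} (hc : columns ≤ 0)
    (hlen : columns = 0 ∨ (nuts.length : Int) ≤ -columns) :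
    sort_nuts nuts rows columns = [] := by
  unfold sort_nuts
  rw [PySem.List.foldl_congr_mem _ _ (fun acc _ => acc) _ ?h, PySem.List.foldl_ignore]
  case h =>
    intro acc row hrow
    have hrow0 : 0 ≤ row := (PySem.List.mem_pyRange_one.mp hrow).1
    have hclamp : PySem.List.clampIdx (PySem.List.sorted nuts keyTop false).length
        ((row + 1) * columns) = 0 := by
      rcases hlen with h0 | hle
      · subst h0; rw [mul_zero]; exact clampIdx_zero _
      · apply clampIdx_eq_zero
        have h1 : (row + 1) * columns ≤ 1 * columns :=
          mul_le_mul_of_nonpos_right (by omega) hc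
        rw [PySem.List.length_sorted]
        omega
    have hslice : PySem.List.slice (PySem.List.sorted nuts keyTop false)
        (some (row * columns)) (some ((row + 1) * columns)) = [] := by
      apply List.eq_nil_of_length_eq_zero
      rw [PySem.List.length_slice, hclamp]
      omega
    rw [hslice]
    simp [PySem.List.sorted]

-- ===== VERDICT (by name: the statement is the Claim_ definition above) =====
theorem sort_nuts_spec : Claim_unchanged_sort_nuts := by
  intro nuts rows columns _ _ hD
  rcases (by omega : rows ≤ 0 ∨ 0 < rows) with hr | hr
  · rw [sort_nuts_eq_nil_of_nonpos_rows nuts columns hr]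
    unfold sort_nuts_alt
    rw [if_pos (Or.inl hr)]
  · rcases lt_trichotomy columns 0 with hc | hc | hc
    · have hlen : (nuts.length : Int) ≤ -columns := by
        unfold D_sort_nuts at hD; push Not at hD
        have := hD hr hc
        omega
      rw [sort_nuts_eq_nil_of_empty_slices nuts rows (le_of_lt hc) (Or.inr hlen)]
      unfold sort_nuts_alt
      rw [if_pos (Or.inr (le_of_lt hc))]
    · rw [sort_nuts_eq_nil_of_empty_slices nuts rows (le_of_eq hc) (Or.inl hc)]
      unfold sort_nuts_alt
      rw [if_pos (Or.inr (le_of_eq hc))]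
    · obtain ⟨R, hR⟩ : ∃ R : Nat, rows = (R : Int) := ⟨rows.toNat, by omega⟩
      obtain ⟨C, hC⟩ : ∃ C : Nat, columns = (C : Int) := ⟨columns.toNat, by omega⟩
      subst hR hC
      exact sort_nuts_eq_pos nuts R C (by exact_mod_cast hr) (by exact_mod_cast hc)
theorem sort_nuts_changed : Claim_changed_sort_nuts := by
  unfold Claim_changed_sort_nuts; decide
theorem sort_nuts_tight : Claim_exact_sort_nuts := by
  intro nuts rows columns _ _ hD
  obtain ⟨hr, hc, hlen⟩ := hD
  have hB : sort_nuts_alt nuts rows columns = [] := by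
    unfold sort_nuts_alt
    rw [if_pos (Or.inr (le_of_lt hc))]
  rw [hB]
  unfold sort_nuts
  rw [PySem.List.pyRange_one_cons (by omega), List.foldl_cons]
  intro hcontra
  obtain ⟨k, hk⟩ : ∃ k : Nat, columns = -(k : Int) := ⟨(-columns).toNat, by omega⟩
  have hk0 : 0 < k := by omega
  have hchunk : PySem.List.slice (PySem.List.sorted nuts keyTop false)
      (some (0 * columns)) (some ((0 + 1) * columns)) ≠ [] := by
    rw [zero_mul, hk]
    have : ((0 : Int) + 1) * -(k : Int) = -(k : Int) := by ring
    rw [this]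
    have hz : PySem.List.slice (PySem.List.sorted nuts keyTop false) (some 0) (some (-(k : Int)))
        = PySem.List.slice (PySem.List.sorted nuts keyTop false) none (some (-(k : Int))) := by
      simp
    rw [hz, PySem.List.slice_to_neg_natCast _ k hk0]
    intro hnil
    have hlen2 := congrArg List.length hnil
    simp only [List.length_take, PySem.List.length_sorted, List.length_nil] at hlen2
    have hk' : k < nuts.length := by
      have : ((k : Int)) < (nuts.length : Int) := by omega
      exact_mod_cast this
    omega
  have hsnil : PySem.List.sorted (PySem.List.slice (PySem.List.sorted nuts keyTop false)
      (some (0 * columns)) (some ((0 + 1) * columns))) keyLeft false ≠ [] := by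
    intro h
    exact hchunk ((PySem.List.sorted_eq_nil_iff _ _ _).mp h)
  have hpre : ∀ (l : List Int) (init : List (List (String × List Int))),
      init ≠ [] → l.foldl (fun acc row => acc ++ PySem.List.sorted
        (PySem.List.slice (PySem.List.sorted nuts keyTop false)
          (some (row * columns)) (some ((row + 1) * columns))) keyLeft false) init ≠ [] := by
    intro l
    induction l with
    | nil => intro init h; exact h
    | cons x l ih =>
      intro init h
      simp only [List.foldl_cons]
      exact ih _ (by simp [h])
  exact hpre _ _ (by simpa using hsnil) hcontra
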